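-- pv_equiv track=rewrite | github.com/ArthurVerrez/project-euler | PE62.py | count_max
-- ===== SOURCE A (Python) =====
-- def count_max(l):
--     max_elt=[]
--     #Indice de la première apparition de last_elt
--     i0=0
--     i=1
--     last_elt=l[0][0]
--     list_last_elt=[l[0][1]]
--     while i<len(l):
--         if l[i][0]!=last_elt:
--             if len(max_elt)<len(list_last_elt):
--                 max_elt=list_last_elt.copy()
--             last_elt=l[i][0]
--             list_last_elt=[l[i][1]]
--         else:
--             list_last_elt.append(l[i][1])
--
--         i+=1
--     if len(max_elt)<len(list_last_elt):
--         return list_last_elt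
--     return max_elt
-- ===== SOURCE B (Python) =====
-- def _gather(k, l, i):
--     # collect second components while the first component still equals k
--     out = []
--     while i < len(l) and l[i][0] == k:
--         out.append(l[i][1])
--         i += 1
--     return out, i
--
-- def count_max(l):
--     # two phases: build all consecutive-equal groups, then take the first longest
--     groups = []
--     i = 0
--     while i < len(l):
--         g, j = _gather(l[i][0], l, i + 1)
--         groups.append([l[i][1]] + g)
--         i = j
--     return max(groups, key=len)
-- ===== Notes on version B (the rewrite author's own statement) =====
-- stated objective: idiomatic
-- what changed: B first builds the list of consecutive-equal groups (second components) and then picks the first longest with max(key=len), instead of A's single loop that threads a running maximum, a last key and a current group through mutable state.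
import Mathlib
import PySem

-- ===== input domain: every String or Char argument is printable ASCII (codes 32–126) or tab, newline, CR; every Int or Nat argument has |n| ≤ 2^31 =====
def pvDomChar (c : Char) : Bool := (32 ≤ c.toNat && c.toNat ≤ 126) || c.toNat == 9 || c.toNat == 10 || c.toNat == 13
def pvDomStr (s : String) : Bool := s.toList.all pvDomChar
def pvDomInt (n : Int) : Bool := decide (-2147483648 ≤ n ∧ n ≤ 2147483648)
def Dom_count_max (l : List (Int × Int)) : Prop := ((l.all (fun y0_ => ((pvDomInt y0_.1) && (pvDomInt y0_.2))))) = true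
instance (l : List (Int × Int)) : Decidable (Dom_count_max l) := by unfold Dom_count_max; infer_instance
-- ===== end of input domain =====

-- B builds the list of consecutive-equal groups first and then picks the first longest (idiomatic two-phase form); equal return values proved on nonempty lists (A raises IndexError on []).


-- ===== PORT A =====
-- A's while loop over i, with state (max_elt, last_elt, list_last_elt), as structural recursion on the tail
def loopA : List (Int × Int) → List Int → Int → List Int → List Int
  | [], maxE, _, cur => if maxE.length < cur.length then cur else maxE
  | p :: t, maxE, last, cur =>
      if p.1 ≠ last then
        loopA t (if maxE.length < cur.length then cur else maxE) p.1 [p.2]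
      else
        loopA t maxE last (cur ++ [p.2])

def count_max (l : List (Int × Int)) : List Int :=
  match l with
  | [] => []          -- Python raises IndexError here (l[0]); excluded by Pre_count_max
  | p :: t => loopA t [] p.1 [p.2]

-- ===== PORT B =====
-- _gather: second components while the first component still equals k, plus the rest
def gatherB (k : Int) : List (Int × Int) → List Int × List (Int × Int)
  | [] => ([], [])
  | p :: t =>
      if p.1 = k then (p.2 :: (gatherB k t).1, (gatherB k t).2)
      else ([], p :: t)

theorem gatherB_len (k : Int) (t : List (Int × Int)) : (gatherB k t).2.length ≤ t.length := by
  induction t with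
  | nil => simp [gatherB]
  | cons p t ih =>
      simp only [gatherB]
      split <;> simp_all <;> omega

-- phase 1: all consecutive-equal groups
def groupsB : List (Int × Int) → List (List Int)
  | [] => []
  | p :: t => (p.2 :: (gatherB p.1 t).1) :: groupsB (gatherB p.1 t).2
termination_by l => l.length
decreasing_by simpa using Nat.lt_succ_of_le (gatherB_len p.1 t)

-- max(groups, key=len): first group of maximal length
def pickB (best x : List Int) : List Int := if best.length < x.length then x else best

def count_max_alt (l : List (Int × Int)) : List Int :=
  match groupsB l with
  | [] => []          -- Python's max raises ValueError here; excluded by Pre_count_max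
  | g :: gs => gs.foldl pickB g

-- ===== PRECONDITION & SPEC =====
-- Pre_ excludes only the empty list, on which A raises IndexError (l[0]).
def Pre_count_max (l : List (Int × Int)) : Prop := l ≠ []
instance (l : List (Int × Int)) : Decidable (Pre_count_max l) := by unfold Pre_count_max; infer_instance
def pvWitness_count_max : (List (Int × Int)) := [(1, 2), (1, 3), (4, 5)]

def Spec_count_max (l : List (Int × Int)) (out : List Int) : Prop := out = count_max_alt l
instance (l : List (Int × Int)) (out : List Int) : Decidable (Spec_count_max l out) := by unfold Spec_count_max; infer_instance

-- ===== CLAIM (what is proved, stated in full; the proofs are below) =====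
def Claim_equal_count_max : Prop := ∀ (l : List (Int × Int)), Dom_count_max l → Pre_count_max l → Spec_count_max l (count_max l)

-- ===== LEMMAS AND PROOFS =====

-- the key invariant: A's loop from state (maxE, last, cur) folds pickB over cur extended by
-- the remaining run of `last`, then over all later groups
theorem groupsB_cons (p : Int × Int) (t : List (Int × Int)) :
    groupsB (p :: t) = (p.2 :: (gatherB p.1 t).1) :: groupsB (gatherB p.1 t).2 := by
  simp [groupsB]

theorem loopA_eq (t : List (Int × Int)) : ∀ (maxE : List Int) (last : Int) (cur : List Int),
    loopA t maxE last cur =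
      ((groupsB (gatherB last t).2).foldl pickB (pickB maxE (cur ++ (gatherB last t).1))) := by
  induction t with
  | nil => intro maxE last cur; simp [loopA, gatherB, groupsB, pickB]
  | cons p t ih =>
      intro maxE last cur
      by_cases h : p.1 = last
      · simp only [loopA, gatherB, h, ite_not, if_true]
        rw [ih maxE last (cur ++ [p.2])]
        simp
      · simp only [loopA, gatherB, ite_not, if_neg h]
        rw [ih (if maxE.length < cur.length then cur else maxE) p.1 [p.2]]
        rw [groupsB_cons]
        simp [List.foldl, pickB]

theorem count_max_spec : Claim_equal_count_max := by
  intro l _ hpre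
  unfold Spec_count_max
  match l with
  | [] => exact absurd rfl hpre
  | p :: t =>
      show loopA t [] p.1 [p.2] = count_max_alt (p :: t)
      rw [loopA_eq]
      unfold count_max_alt
      rw [groupsB_cons]
      simp [pickB]
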